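-- pv_equiv track=rewrite | github.com/William-Blackie/Genetic-Algorithm-Rule-Classification | individual.py | match_cond
-- ===== SOURCE A (Python) =====
-- def match_cond(current_rule, current_gene):
--     gene_index = 0
--     for x in range(0, len(current_rule)):
--         gene1 = current_gene[gene_index]
--         gene2 = current_gene[gene_index + 1]
--         rule = current_rule[x]
--         if gene1 >= rule or rule >= gene2:
--             return False
--         gene_index + 2
--     return True
-- ===== SOURCE B (Python) =====
-- def match_cond(current_rule, current_gene):
--     if not current_rule:
--         return True
--     return current_gene[0] < min(current_rule) and max(current_rule) < current_gene[1]
-- ===== Notes on version B (the rewrite author's own statement) =====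
-- stated objective: simpler
-- what changed: Replaced the per-element early-return index loop (whose gene_index never advances) by an aggregate test: empty rule is True, otherwise compare the rule's min and max against the two interval endpoints current_gene[0] and current_gene[1].
import Mathlib
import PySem

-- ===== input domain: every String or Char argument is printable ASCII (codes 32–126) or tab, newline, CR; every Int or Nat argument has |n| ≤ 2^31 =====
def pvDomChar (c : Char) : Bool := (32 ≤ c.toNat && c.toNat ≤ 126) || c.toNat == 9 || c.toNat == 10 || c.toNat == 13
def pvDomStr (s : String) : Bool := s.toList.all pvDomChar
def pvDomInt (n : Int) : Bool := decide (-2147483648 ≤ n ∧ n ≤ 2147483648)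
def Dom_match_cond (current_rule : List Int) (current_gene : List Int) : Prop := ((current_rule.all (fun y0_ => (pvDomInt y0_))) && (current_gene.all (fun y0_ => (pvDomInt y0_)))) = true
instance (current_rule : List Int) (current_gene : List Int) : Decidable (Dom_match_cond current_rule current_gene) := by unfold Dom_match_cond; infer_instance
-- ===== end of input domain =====

-- B replaces A's per-element early-return index loop by an aggregate min/max interval test (objective: simpler).

-- ===== PORT A =====
-- loop over the index list 'range(0, len(current_rule))'; gene_index stays 0 ('gene_index + 2' is a no-op in A)
def matchAGo (current_rule : List Int) (current_gene : List Int) (gene_index : Int) : List Int → Bool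
  | [] => true
  | x :: rest =>
    match PySem.List.pyGet? current_gene gene_index,
          PySem.List.pyGet? current_gene (gene_index + 1),
          PySem.List.pyGet? current_rule x with
    | some gene1, some gene2, some rule =>
        if gene1 ≥ rule || rule ≥ gene2 then false
        else matchAGo current_rule current_gene gene_index rest
    | _, _, _ => false   -- IndexError in Python; excluded by Pre_match_cond

def match_cond (current_rule : List Int) (current_gene : List Int) : Bool :=
  matchAGo current_rule current_gene 0 (PySem.List.pyRange 0 current_rule.length 1)

-- ===== PORT B =====
def match_cond_alt (current_rule : List Int) (current_gene : List Int) : Bool :=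
  if current_rule.isEmpty then true
  else
    match PySem.List.pyGet? current_gene 0,
          PySem.List.min? current_rule (fun r => r),
          PySem.List.max? current_rule (fun r => r),
          PySem.List.pyGet? current_gene 1 with
    | some g1, some lo, some hi, some g2 => g1 < lo && hi < g2
    | _, _, _, _ => false   -- IndexError in Python; excluded by Pre_match_cond

-- ===== PRECONDITION & SPEC =====
-- Pre_ excludes exactly the inputs where the Python A raises IndexError:
-- a non-empty current_rule with fewer than two genes (A indexes current_gene[0] and current_gene[1]).
def Pre_match_cond (current_rule : List Int) (current_gene : List Int) : Prop :=
  current_rule = [] ∨ 2 ≤ current_gene.length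
instance (current_rule : List Int) (current_gene : List Int) : Decidable (Pre_match_cond current_rule current_gene) := by unfold Pre_match_cond; infer_instance
def pvWitness_match_cond : List Int × List Int := ([2, 3], [1, 5])

def Spec_match_cond (current_rule : List Int) (current_gene : List Int) (out : Bool) : Prop := out = match_cond_alt current_rule current_gene
instance (current_rule : List Int) (current_gene : List Int) (out : Bool) : Decidable (Spec_match_cond current_rule current_gene out) := by unfold Spec_match_cond; infer_instance

-- ===== CLAIM (what is proved, stated in full; the proofs are below) =====
def Claim_equal_match_cond : Prop := ∀ (current_rule : List Int) (current_gene : List Int), Dom_match_cond current_rule current_gene → Pre_match_cond current_rule current_gene → Spec_match_cond current_rule current_gene (match_cond current_rule current_gene)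

-- ===== LEMMAS AND PROOFS =====
-- A's loop over indices k..len-1 tests exactly the elements of (rule.drop k) against the fixed interval
theorem matchAGo_eq_all (rule gene : List Int) (a b : Int)
    (ha : PySem.List.pyGet? gene 0 = some a) (hb : PySem.List.pyGet? gene 1 = some b) :
    ∀ d k : Nat, rule.length - k = d →
      matchAGo rule gene 0 (PySem.List.pyRange (k : Int) (rule.length : Int) 1)
        = (rule.drop k).all (fun r => decide (a < r) && decide (r < b)) := by
  intro d
  induction d with
  | zero =>
    intro k hk
    have hge : rule.length ≤ k := by omega
    rw [PySem.List.pyRange_one_eq_nil (by exact_mod_cast hge)]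
    rw [List.drop_eq_nil_of_le hge]
    rfl
  | succ n ih =>
    intro k hk
    have hlt : k < rule.length := by omega
    rw [PySem.List.pyRange_one_cons (by exact_mod_cast hlt)]
    have hr : PySem.List.pyGet? rule (k : Int) = some rule[k] :=
      PySem.List.pyGet?_ofNat rule k hlt
    have hdrop : rule.drop k = rule[k] :: rule.drop (k + 1) :=
      (List.getElem_cons_drop hlt).symm
    have hcast : ((k : Int) + 1) = ((k + 1 : Nat) : Int) := by push_cast; ring
    simp only [matchAGo, ha, hb, hr, hdrop, List.all_cons, hcast,
      ih (k + 1) (by omega), zero_add]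
    by_cases h1 : a ≥ rule[k]
    · simp [h1, not_lt.mpr h1]
    · by_cases h2 : rule[k] ≥ b
      · simp [h1, h2, not_lt.mpr h2]
      · simp [h1, h2, lt_of_not_ge h1, lt_of_not_ge h2]

-- the running-min loop characterised: a is below the fold iff it is below the seed and every element
theorem foldl_min_lt_iff (a : Int) : ∀ (t : List Int) (x : Int),
    a < t.foldl min x ↔ a < x ∧ ∀ r ∈ t, a < r := by
  intro t
  induction t with
  | nil => simp
  | cons y t ih =>
    intro x
    simp only [List.foldl_cons, ih, lt_min_iff, List.mem_cons]
    constructor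
    · rintro ⟨⟨h1, h2⟩, h3⟩
      exact ⟨h1, fun r hr => by rcases hr with rfl | hr; exact h2; exact h3 r hr⟩
    · rintro ⟨h1, h2⟩
      exact ⟨⟨h1, h2 y (Or.inl rfl)⟩, fun r hr => h2 r (Or.inr hr)⟩

theorem foldl_max_lt_iff (b : Int) : ∀ (t : List Int) (x : Int),
    t.foldl max x < b ↔ x < b ∧ ∀ r ∈ t, r < b := by
  intro t
  induction t with
  | nil => simp
  | cons y t ih =>
    intro x
    simp only [List.foldl_cons, ih, max_lt_iff, List.mem_cons]
    constructor
    · rintro ⟨⟨h1, h2⟩, h3⟩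
      exact ⟨h1, fun r hr => by rcases hr with rfl | hr; exact h2; exact h3 r hr⟩
    · rintro ⟨h1, h2⟩
      exact ⟨⟨h1, h2 y (Or.inl rfl)⟩, fun r hr => h2 r (Or.inr hr)⟩

-- B's min/max interval test equals the all-elements test, on a non-empty list
theorem all_eq_minmax (a b x : Int) (t : List Int) :
    (x :: t).all (fun r => decide (a < r) && decide (r < b))
      = (decide (a < t.foldl min x) && decide (t.foldl max x < b)) := by
  rw [Bool.eq_iff_iff]
  simp only [List.all_cons, List.all_eq_true, Bool.and_eq_true, decide_eq_true_eq,
    foldl_min_lt_iff, foldl_max_lt_iff]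
  constructor
  · rintro ⟨⟨h1, h2⟩, h3⟩
    exact ⟨⟨h1, fun r hr => (h3 r hr).1⟩, h2, fun r hr => (h3 r hr).2⟩
  · rintro ⟨⟨h1, h2⟩, h3, h4⟩
    exact ⟨⟨h1, h3⟩, fun r hr => ⟨h2 r hr, h4 r hr⟩⟩

-- ===== VERDICT (by name: the statement is the Claim_ definition above) =====
theorem match_cond_spec : Claim_equal_match_cond := by
  intro rule gene _ hpre
  unfold Spec_match_cond match_cond match_cond_alt
  rcases rule with _ | ⟨x, t⟩
  · simp [matchAGo, PySem.List.pyRange_one_eq_nil]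
  · rcases gene with _ | ⟨a, _ | ⟨b, g⟩⟩
    · rcases hpre with h | h
      · exact absurd h (by simp)
      · simp at h
    · rcases hpre with h | h
      · exact absurd h (by simp)
      · simp at h
    · have ha : PySem.List.pyGet? (a :: b :: g) 0 = some a := by
        simp [PySem.List.pyGet?_zero_cons]
      have hb : PySem.List.pyGet? (a :: b :: g) 1 = some b := by
        rw [show (1 : Int) = ((1 : Nat) : Int) from rfl, PySem.List.pyGet?_natCast]
        rfl
      have key := matchAGo_eq_all (x :: t) (a :: b :: g) a b ha hb ((x :: t).length) 0 (by omega)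
      simp only [Nat.cast_zero, List.drop_zero] at key
      rw [key, all_eq_minmax, ha, hb,
        PySem.List.min?_id_cons, PySem.List.max?_id_cons]
      simp
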